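-- pv_equiv track=rewrite | github.com/c-yan/yukicoder | yc168/539.py | f
-- ===== SOURCE A (Python) =====
-- def increment(S):
--     carry = 1
--     t = []
--     for c in reversed(S):
--         x = int(c) + carry
--         if x == 10:
--             t.append('0')
--             carry = 1
--         else:
--             t.append(str(x))
--             carry = 0
--     if carry == 1:
--         t.append('1')
--     t = ''.join(reversed(t))
--     if S[0] != '0':
--         return t
--     return S[:len(S)-len(t)] + t
--
-- def f(S):
--     n = len(S)
--     l, r = 0, 0
--     for i in range(n):
--         if r == 0 and S[n - 1 - i] in '0123456789':
--             r = n - i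
--         elif r != 0 and S[n - 1 - i] not in '0123456789':
--             l = n - i
--             break
--     if r == 0:
--         return S
--     return S[:l] + increment(S[l:r]) + S[r:]
-- ===== SOURCE B (Python) =====
-- def f(S):
--     r = len(S)
--     while r > 0 and not ('0' <= S[r - 1] <= '9'):
--         r -= 1
--     if r == 0:
--         return S
--     l = r
--     while l > 0 and '0' <= S[l - 1] <= '9':
--         l -= 1
--     j = r
--     while j > l and S[j - 1] == '9':
--         j -= 1
--     if j == l:
--         inc = '1' + '0' * (r - l)
--     else:
--         inc = S[l:j - 1] + chr(ord(S[j - 1]) + 1) + '0' * (r - j)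
--     return S[:l] + inc + S[r:]
-- ===== Notes on version B (the rewrite author's own statement) =====
-- stated objective: simpler
-- what changed: Replaces A's flag-driven single scan plus per-digit carry-propagation loop (building a reversed char list, then a leading-zero repair step) by three plain backward scans: find the run's end, its start, and the trailing block of '9's, then emit the run with that block zeroed and the digit before it bumped (or '1'+zeros if the run is all nines); no big-int conversion, no carry state, no join/reverse.
import Mathlib
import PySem

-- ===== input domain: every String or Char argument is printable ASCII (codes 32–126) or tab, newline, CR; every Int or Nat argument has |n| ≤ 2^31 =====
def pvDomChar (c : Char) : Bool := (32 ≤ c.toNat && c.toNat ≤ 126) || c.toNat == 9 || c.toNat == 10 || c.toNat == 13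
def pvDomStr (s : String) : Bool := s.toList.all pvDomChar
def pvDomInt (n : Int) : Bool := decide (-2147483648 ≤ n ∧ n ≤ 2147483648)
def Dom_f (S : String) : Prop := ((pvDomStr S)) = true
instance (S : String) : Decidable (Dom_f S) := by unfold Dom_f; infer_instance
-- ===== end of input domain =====

-- B replaces A's per-digit carry-propagation loop (and its leading-zero repair step) by
-- locating the run's trailing '9'-block and editing a single digit; same O(n) cost, simpler.

-- ===== PORT A =====

-- `c in '0123456789'` (membership of the 1-char string S[i] in the digit string)
def isDigA (c : Char) : Bool := ['0','1','2','3','4','5','6','7','8','9'].contains c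

-- int(c) for a single character; exact on the digit characters `increment` receives from `f`
def digitVal (c : Char) : Int := (PySem.Int.ofChars? [c]).getD 0

-- the body of `for c in reversed(S)` in `increment`: state (t, carry)
def incStep (st : List (List Char) × Int) (c : Char) : List (List Char) × Int :=
  let x := digitVal c + st.2
  if x = 10 then (st.1 ++ [['0']], 1) else (st.1 ++ [PySem.Int.toChars x], 0)

def increment (S : List Char) : List Char :=
  let p := S.reverse.foldl incStep ([], 1)
  let t0 := if p.2 = 1 then p.1 ++ [['1']] else p.1
  let t := t0.reverse.flatten                      -- ''.join(reversed(t))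
  -- S[0]: `f` only calls increment on a nonempty run, so the default is never read
  if PySem.List.pyGetD S 0 ' ' ≠ '0' then t
  else PySem.List.slice S none (some (PySem.List.len S - PySem.List.len t)) ++ t

-- the `for i in range(n)` loop of `f`, with its break; i is consumed from the range list
def fScan (cs : List Char) (n : Int) : List Int → Int → Int → Int × Int
  | [], l, r => (l, r)
  | i :: rest, l, r =>
    let c := PySem.List.pyGetD cs (n - 1 - i) ' '
    if r = 0 ∧ isDigA c then fScan cs n rest l (n - i)
    else if r ≠ 0 ∧ ¬ isDigA c then (n - i, r)      -- break
    else fScan cs n rest l r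

def f (S : String) : String :=
  let cs := S.toList
  let n : Int := PySem.List.len cs
  let lr := fScan cs n (PySem.List.pyRange 0 n 1) 0 0
  if lr.2 = 0 then S
  else String.ofList (PySem.List.slice cs none (some lr.1)
        ++ increment (PySem.List.slice cs (some lr.1) (some lr.2))
        ++ PySem.List.slice cs (some lr.2) none)

-- ===== PORT B =====

def isDigB (c : Char) : Bool := decide ('0' ≤ c) && decide (c ≤ '9')

-- while r > 0 and not ('0' <= S[r-1] <= '9'): r -= 1
def rScanB (cs : List Char) : Nat → Nat
  | 0 => 0
  | r + 1 => if isDigB (cs.getD r ' ') then r + 1 else rScanB cs r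

-- while l > 0 and '0' <= S[l-1] <= '9': l -= 1
def lScanB (cs : List Char) : Nat → Nat
  | 0 => 0
  | l + 1 => if isDigB (cs.getD l ' ') then lScanB cs l else l + 1

-- while j > l and S[j-1] == '9': j -= 1
def jScanB (cs : List Char) (l : Nat) : Nat → Nat
  | 0 => 0
  | j + 1 => if l ≤ j ∧ cs.getD j ' ' = '9' then jScanB cs l j else j + 1

def f_alt (S : String) : String :=
  let cs := S.toList
  let r := rScanB cs cs.length
  if r = 0 then S
  else
    let l := lScanB cs r
    let j := jScanB cs l r
    let inc := if j = l then '1' :: List.replicate (r - l) '0'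
      else ((cs.drop l).take (j - 1 - l))                       -- S[l:j-1]
        ++ [Char.ofNat ((cs.getD (j - 1) ' ').toNat + 1)]       -- chr(ord(S[j-1]) + 1)
        ++ List.replicate (r - j) '0'
    String.ofList (cs.take l ++ inc ++ cs.drop r)

-- ===== PRECONDITION & SPEC =====
def Spec_f (S : String) (out : String) : Prop := out = f_alt S
instance (S : String) (out : String) : Decidable (Spec_f S out) := by unfold Spec_f; infer_instance

-- ===== CLAIM (what is proved, stated in full; the proofs are below) =====
def Claim_equal_f : Prop := ∀ (S : String), Dom_f S → Spec_f S (f S)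

-- ===== LEMMAS AND PROOFS =====

theorem digit_cases (c : Char) (h : isDigB c = true) :
    c = '0' ∨ c = '1' ∨ c = '2' ∨ c = '3' ∨ c = '4' ∨ c = '5' ∨ c = '6' ∨ c = '7' ∨ c = '8' ∨ c = '9' := by
  simp only [isDigB, Bool.and_eq_true, decide_eq_true_eq, Char.le_def] at h
  obtain ⟨h1, h2⟩ := h
  rw [UInt32.le_iff_toNat_le] at h1 h2
  have h48 : ('0').val.toNat = 48 := by decide
  have h57 : ('9').val.toNat = 57 := by decide
  rw [h48] at h1; rw [h57] at h2
  have hct : c.toNat = c.val.toNat := rfl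
  have hv : c.toNat = 48 ∨ c.toNat = 49 ∨ c.toNat = 50 ∨ c.toNat = 51 ∨ c.toNat = 52 ∨ c.toNat = 53 ∨ c.toNat = 54 ∨ c.toNat = 55 ∨ c.toNat = 56 ∨ c.toNat = 57 := by omega
  have hofnat := Char.ofNat_toNat c
  rcases hv with h|h|h|h|h|h|h|h|h|h <;> rw [h] at hofnat <;> simp [← hofnat]

theorem isDig_eq (c : Char) : isDigA c = isDigB c := by
  by_cases h : isDigB c = true
  · rcases digit_cases c h with h'|h'|h'|h'|h'|h'|h'|h'|h'|h' <;> subst h' <;> decide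
  · simp only [Bool.not_eq_true] at h
    rw [h]
    simp only [isDigA, List.contains_eq_mem, decide_eq_false_iff_not, List.mem_cons]
    intro hc
    have : isDigB c = true := by
      rcases hc with h'|h'|h'|h'|h'|h'|h'|h'|h'|h'|h'
      all_goals first | (subst h'; decide) | simp at h'
    rw [h] at this; exact Bool.false_ne_true this

theorem pyRange_peel (n' m : Nat) (h : m + 1 ≤ n') :
    PySem.List.pyRange ((n' : Int) - ((m : Int) + 1)) (n' : Int) 1
      = ((n' : Int) - ((m : Int) + 1)) :: PySem.List.pyRange ((n' : Int) - (m : Int)) (n' : Int) 1 := by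
  rw [PySem.List.pyRange_one_cons (by omega)]
  have : (n' : Int) - ((m : Int) + 1) + 1 = (n' : Int) - (m : Int) := by omega
  rw [this]

theorem fScan_phase2 (cs : List Char) (m : Nat) (hm : m ≤ cs.length) (r : Int) (hr : r ≠ 0) :
    fScan cs (cs.length : Int) (PySem.List.pyRange ((cs.length : Int) - m) (cs.length : Int) 1) 0 r
      = ((lScanB cs m : Int), r) := by
  induction m with
  | zero =>
    have : PySem.List.pyRange ((cs.length : Int) - 0) (cs.length : Int) 1 = [] := by
      simp [PySem.List.pyRange]
    rw [show ((0:Nat):Int) = 0 from rfl] at *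
    rw [this]
    simp [fScan, lScanB]
  | succ m ih =>
    have hcast : ((m + 1 : Nat) : Int) = (m : Int) + 1 := by push_cast; ring
    rw [hcast, pyRange_peel cs.length m hm]
    rw [fScan]
    have hidx : (cs.length : Int) - 1 - ((cs.length : Int) - ((m : Int) + 1)) = (m : Int) := by omega
    rw [hidx]
    simp only [PySem.List.pyGetD_natCast, ← List.getD_eq_getElem?_getD]
    rw [isDig_eq]
    by_cases hd : isDigB (cs.getD m ' ') = true
    · have hd2 : isDigB (cs[m]?.getD ' ') = true := by rw [← List.getD_eq_getElem?_getD]; exact hd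
      rw [hd, if_neg (by simp [hr]), if_neg (by simp)]
      rw [ih (by omega)]
      rw [lScanB, if_pos hd]
    · simp only [Bool.not_eq_true] at hd
      have hd2 : isDigB (cs[m]?.getD ' ') = false := by rw [← List.getD_eq_getElem?_getD]; exact hd
      rw [hd, if_neg (by simp), if_pos (by simp [hr])]
      rw [lScanB, if_neg (by simp [List.getD_eq_getElem?_getD, hd2])]
      simp only [Prod.mk.injEq]
      exact ⟨by omega, trivial⟩

theorem fScan_phase1 (cs : List Char) (m : Nat) (hm : m ≤ cs.length) :
    fScan cs (cs.length : Int) (PySem.List.pyRange ((cs.length : Int) - m) (cs.length : Int) 1) 0 0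
      = ((lScanB cs (rScanB cs m) : Int), (rScanB cs m : Int)) := by
  induction m with
  | zero =>
    have : PySem.List.pyRange ((cs.length : Int) - 0) (cs.length : Int) 1 = [] := by
      simp [PySem.List.pyRange]
    rw [show ((0:Nat):Int) = 0 from rfl] at *
    rw [this]
    simp [fScan, lScanB, rScanB]
  | succ m ih =>
    have hcast : ((m + 1 : Nat) : Int) = (m : Int) + 1 := by push_cast; ring
    rw [hcast, pyRange_peel cs.length m hm]
    rw [fScan]
    have hidx : (cs.length : Int) - 1 - ((cs.length : Int) - ((m : Int) + 1)) = (m : Int) := by omega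
    rw [hidx]
    simp only [PySem.List.pyGetD_natCast, ← List.getD_eq_getElem?_getD]
    rw [isDig_eq]
    by_cases hd : isDigB (cs.getD m ' ') = true
    · rw [hd, if_pos (by simp)]
      have hri : (cs.length : Int) - ((cs.length : Int) - ((m : Int) + 1)) = ((m + 1 : Nat) : Int) := by omega
      rw [hri]
      rw [fScan_phase2 cs m (by omega) _ (by positivity)]
      rw [show rScanB cs (m+1) = m+1 from by rw [rScanB, if_pos hd],
         show lScanB cs (m+1) = lScanB cs m from by rw [lScanB, if_pos hd]]
    · simp only [Bool.not_eq_true] at hd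
      rw [hd, if_neg (by simp), if_neg (by simp)]
      rw [ih (by omega)]
      have hr1 : rScanB cs (m+1) = rScanB cs m := by
        rw [rScanB]
        rw [if_neg]
        rw [hd]
        exact Bool.false_ne_true
      rw [hr1]

theorem toChars_digitVal (c : Char) (h : isDigB c = true) :
    PySem.Int.toChars (digitVal c) = [c] ∧ digitVal c + 0 ≠ 10 := by
  rcases digit_cases c h with h'|h'|h'|h'|h'|h'|h'|h'|h'|h' <;> subst h' <;> exact ⟨by decide, by decide⟩

theorem succ_digitVal (c : Char) (h : isDigB c = true) (h9 : c ≠ '9') :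
    PySem.Int.toChars (digitVal c + 1) = [Char.ofNat (c.toNat + 1)] ∧ digitVal c + 1 ≠ 10 := by
  rcases digit_cases c h with h'|h'|h'|h'|h'|h'|h'|h'|h'|h' <;> subst h' <;>
    first | (exact absurd rfl h9) | exact ⟨by decide, by decide⟩

theorem fold_nines (k : Nat) (t0 : List (List Char)) :
    List.foldl incStep (t0, 1) (List.replicate k '9') = (t0 ++ List.replicate k ['0'], 1) := by
  induction k generalizing t0 with
  | zero => simp
  | succ k ih =>
    rw [List.replicate_succ, List.foldl_cons]
    have : incStep (t0, 1) '9' = (t0 ++ [['0']], 1) := by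
      simp [incStep, digitVal]
      decide
    rw [this, ih]
    simp [List.replicate_succ]

theorem fold_carry0 (cs : List Char) (hd : ∀ c ∈ cs, isDigB c = true) (t0 : List (List Char)) :
    List.foldl incStep (t0, 0) cs = (t0 ++ cs.map (fun c => [c]), 0) := by
  induction cs generalizing t0 with
  | nil => simp
  | cons c cs ih =>
    rw [List.foldl_cons]
    obtain ⟨h1, h2⟩ := toChars_digitVal c (hd c (by simp))
    have : incStep (t0, 0) c = (t0 ++ [[c]], 0) := by
      simp only [incStep, if_neg h2]
      rw [show digitVal c + 0 = digitVal c from by ring, h1]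
    rw [this, ih (fun x hx => hd x (by simp [hx]))]
    simp

theorem flatten_map_singleton (cs : List Char) : (cs.map (fun c => [c])).flatten = cs := by
  induction cs with
  | nil => rfl
  | cons c cs ih => simp [ih]

theorem flatten_replicate_singleton (k : Nat) :
    (List.replicate k (['0'] : List Char)).flatten = List.replicate k '0' := by
  induction k with
  | zero => rfl
  | succ k ih => simp [List.replicate_succ, ih]

theorem increment_nines (k : Nat) (hk : 1 ≤ k) :
    increment (List.replicate k '9') = '1' :: List.replicate k '0' := by
  unfold increment
  rw [List.reverse_replicate, fold_nines]
  have h0 : PySem.List.pyGetD (List.replicate k '9') 0 ' ' = '9' := by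
    rcases k with _|k
    · omega
    · simp [List.replicate_succ, PySem.List.pyGetD_zero_cons]
  simp only [h0]
  rw [if_true]
  rw [List.nil_append, List.reverse_append, List.reverse_replicate]
  simp only [List.reverse_cons, List.reverse_nil, List.nil_append]
  rw [if_pos (show ('9':Char) ≠ '0' by decide)]
  simp [flatten_replicate_singleton]

theorem increment_run (pre : List Char) (d : Char) (k : Nat)
    (hpre : ∀ c ∈ pre, isDigB c = true) (hd : isDigB d = true) (h9 : d ≠ '9') :
    increment (pre ++ d :: List.replicate k '9')
      = pre ++ Char.ofNat (d.toNat + 1) :: List.replicate k '0' := by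
  unfold increment
  obtain ⟨hs1, hs2⟩ := succ_digitVal d hd h9
  have hrev : (pre ++ d :: List.replicate k '9').reverse
      = List.replicate k '9' ++ ([d] ++ pre.reverse) := by
    rw [List.reverse_append, List.reverse_cons, List.reverse_replicate, List.append_assoc]
  rw [hrev]
  rw [List.foldl_append, fold_nines, List.foldl_append]
  have hstep : List.foldl incStep (List.nil ++ List.replicate k ['0'], 1) [d]
      = (List.replicate k ['0'] ++ [PySem.Int.toChars (digitVal d + 1)], 0) := by
    simp only [List.foldl_cons, List.foldl_nil, List.nil_append, incStep, if_neg hs2]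
  rw [hstep, fold_carry0 pre.reverse (by intro c hc; exact hpre c (List.mem_reverse.mp hc))]
  rw [hs1]
  simp only [show ((0:Int) = 1) = False from by simp, if_false, List.nil_append]
  have hflat : ((List.replicate k ['0'] ++ [[Char.ofNat (d.toNat + 1)]]
        ++ pre.reverse.map (fun c => [c])).reverse.flatten)
      = pre ++ Char.ofNat (d.toNat + 1) :: List.replicate k '0' := by
    rw [List.reverse_append, List.reverse_append, List.reverse_replicate]
    rw [List.map_reverse, List.reverse_reverse]
    simp only [List.flatten_append, flatten_map_singleton, List.reverse_cons, List.reverse_nil,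
      List.nil_append, List.flatten_cons, flatten_replicate_singleton]
    simp
  rw [hflat]
  have hlen : PySem.List.len (pre ++ d :: List.replicate k '9')
      - PySem.List.len (pre ++ Char.ofNat (d.toNat + 1) :: List.replicate k '0') = 0 := by
    simp [PySem.List.len_eq]
  rw [hlen]
  have hslice : PySem.List.slice (pre ++ d :: List.replicate k '9') none (some 0) = [] := by
    rw [PySem.List.slice_to _ (le_refl 0)]
    simp
  split
  · rfl
  · rw [hslice]; simp

theorem rScanB_le (cs : List Char) (m : Nat) : rScanB cs m ≤ m := by
  induction m with
  | zero => simp [rScanB]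
  | succ m ih => rw [rScanB]; split <;> omega

theorem rScanB_digit (cs : List Char) (m : Nat) (h : rScanB cs m ≠ 0) :
    isDigB (cs.getD (rScanB cs m - 1) ' ') = true := by
  induction m with
  | zero => simp [rScanB] at h
  | succ m ih =>
    by_cases hd : isDigB (cs.getD m ' ') = true
    · rw [rScanB, if_pos hd]
      simpa using hd
    · rw [rScanB, if_neg hd] at h ⊢
      exact ih h

theorem lScanB_le (cs : List Char) (m : Nat) : lScanB cs m ≤ m := by
  induction m with
  | zero => simp [lScanB]
  | succ m ih => rw [lScanB]; split <;> omega

theorem lScanB_digits (cs : List Char) (m : Nat) :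
    ∀ k, lScanB cs m ≤ k → k < m → isDigB (cs.getD k ' ') = true := by
  induction m with
  | zero => omega
  | succ m ih =>
    intro k h1 h2
    rw [lScanB] at h1
    split at h1
    · rcases Nat.lt_or_ge k m with hk | hk
      · exact ih k h1 hk
      · have : k = m := by omega
        subst this; assumption
    · omega

theorem jScanB_ge (cs : List Char) (l m : Nat) (hl : l ≤ m) : l ≤ jScanB cs l m := by
  induction m with
  | zero => omega
  | succ m ih =>
    rw [jScanB]
    split
    · exact ih (by omega)
    · omega

theorem jScanB_le (cs : List Char) (l m : Nat) : jScanB cs l m ≤ m := by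
  induction m with
  | zero => simp [jScanB]
  | succ m ih => rw [jScanB]; split <;> omega

theorem jScanB_nines (cs : List Char) (l m : Nat) :
    ∀ k, jScanB cs l m ≤ k → k < m → cs.getD k ' ' = '9' := by
  induction m with
  | zero => omega
  | succ m ih =>
    intro k h1 h2
    rw [jScanB] at h1
    split at h1
    · rcases Nat.lt_or_ge k m with hk | hk
      · exact ih k h1 hk
      · have : k = m := by omega
        subst this
        tauto
    · omega

theorem jScanB_stop (cs : List Char) (l m : Nat) (hl : l ≤ m) :
    jScanB cs l m = l ∨ (l < jScanB cs l m ∧ cs.getD (jScanB cs l m - 1) ' ' ≠ '9') := by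
  induction m with
  | zero =>
    left
    have : l = 0 := by omega
    simp [jScanB, this]
  | succ m ih =>
    rw [jScanB]
    split
    · exact ih (by omega)
    · rename_i hg
      rcases Nat.lt_or_ge l (m + 1) with hlt | hge
      · right
        refine ⟨hlt, ?_⟩
        simp only [Nat.add_sub_cancel]
        intro h9
        exact hg ⟨by omega, h9⟩
      · left; omega

theorem run_decomp_nines (cs : List Char) (l r : Nat) (hlr : l < r) (hr : r ≤ cs.length)
    (h9 : ∀ k, l ≤ k → k < r → cs.getD k ' ' = '9') :
    (cs.drop l).take (r - l) = List.replicate (r - l) '9' := by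
  apply List.ext_getElem
  · simp; omega
  · intro i h1 h2
    simp only [List.getElem_take, List.getElem_drop, List.getElem_replicate]
    have hlen : (cs.drop l).length = cs.length - l := by simp
    have hi : l + i < cs.length := by
      simp at h1; omega
    have := h9 (l + i) (by omega) (by simp at h1; omega)
    rwa [List.getD_eq_getElem cs ' ' hi] at this

theorem run_decomp (cs : List Char) (l j r : Nat) (hlj : l < j) (hjr : j ≤ r) (hr : r ≤ cs.length)
    (h9 : ∀ k, j ≤ k → k < r → cs.getD k ' ' = '9') :
    (cs.drop l).take (r - l)
      = (cs.drop l).take (j - 1 - l) ++ cs.getD (j - 1) ' ' :: List.replicate (r - j) '9' := by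
  apply List.ext_getElem
  · simp; omega
  · intro i h1 h2
    have hil : l + i < cs.length := by simp at h1; omega
    simp only [List.getElem_take, List.getElem_drop]
    rcases Nat.lt_or_ge i (j - 1 - l) with hi | hi
    · rw [List.getElem_append_left (by simp; omega)]
      simp only [List.getElem_take, List.getElem_drop]
    · rw [List.getElem_append_right (by simp; omega)]
      have hlen : ((cs.drop l).take (j - 1 - l)).length = j - 1 - l := by simp; omega
      simp only [hlen]
      rcases Nat.eq_or_lt_of_le hi with he | hlt
      · have hidx : i - (j - 1 - l) = 0 := by omega
        simp only [hidx, List.getElem_cons_zero]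
        rw [List.getD_eq_getElem cs ' ' (by omega)]
        congr 1
        omega
      · obtain ⟨k, hk⟩ : ∃ k, i - (j - 1 - l) = k + 1 := ⟨i - (j - 1 - l) - 1, by omega⟩
        simp only [hk, List.getElem_cons_succ, List.getElem_replicate]
        have := h9 (l + i) (by omega) (by simp at h1; omega)
        rwa [List.getD_eq_getElem cs ' ' hil] at this

theorem f_eq_f_alt (S : String) : f S = f_alt S := by
  unfold f f_alt
  set cs := S.toList with hcs
  have hp := fScan_phase1 cs cs.length (le_refl _)
  rw [show ((cs.length : Int) - (cs.length : Nat)) = 0 from by omega] at hp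
  simp only [PySem.List.len_eq, hp]
  set r0 := rScanB cs cs.length with hr0def
  by_cases hr0 : r0 = 0
  · simp [hr0]
  · have hr0p : 1 ≤ r0 := by omega
    have hrle : r0 ≤ cs.length := rScanB_le cs cs.length
    set l := lScanB cs r0 with hldef
    set j := jScanB cs l r0 with hjdef
    have hdig : ∀ k, l ≤ k → k < r0 → isDigB (cs.getD k ' ') = true := lScanB_digits cs r0
    have hlr : l < r0 := by
      obtain ⟨m, hm⟩ : ∃ m, r0 = m + 1 := ⟨r0 - 1, by omega⟩
      have hd := rScanB_digit cs cs.length hr0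
      rw [← hr0def, hm] at hd
      simp only [Nat.add_sub_cancel] at hd
      have h1 : lScanB cs (m + 1) = lScanB cs m := by rw [lScanB, if_pos hd]
      have h2 := lScanB_le cs m
      rw [hldef, hm, h1]
      omega
    have hlle : l ≤ r0 := le_of_lt hlr
    have hjge : l ≤ j := jScanB_ge cs l r0 hlle
    have hjle : j ≤ r0 := jScanB_le cs l r0
    have hnines : ∀ k, j ≤ k → k < r0 → cs.getD k ' ' = '9' := jScanB_nines cs l r0
    rw [if_neg (by simpa using hr0), if_neg hr0]
    rw [PySem.List.slice_to_natCast, PySem.List.slice_natCast, PySem.List.slice_from_natCast]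
    by_cases hjl : j = l
    · -- the whole run is '9's
      have hds : (cs.drop l).take (r0 - l) = List.replicate (r0 - l) '9' :=
        run_decomp_nines cs l r0 hlr hrle (fun k h1 h2 => hnines k (by omega) h2)
      rw [hds, increment_nines (r0 - l) (by omega), if_pos hjl]
    · -- run = pre ++ d :: '9'*k with d ≠ '9'
      have hstop := jScanB_stop cs l r0 hlle
      have hlj : l < j := by
        rcases hstop with h | h
        · exact absurd h hjl
        · exact h.1
      have hne9 : cs.getD (j - 1) ' ' ≠ '9' := by
        rcases hstop with h | h
        · exact absurd h hjl
        · exact h.2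
      have hds := run_decomp cs l j r0 hlj hjle hrle hnines
      have hpre : ∀ c ∈ (cs.drop l).take (j - 1 - l), isDigB c = true := by
        intro c hc
        obtain ⟨i, hi, hg⟩ := List.mem_iff_getElem.mp hc
        simp only [List.length_take, List.length_drop, lt_min_iff] at hi
        have hi' : i < j - 1 - l := hi.1
        have hil : l + i < cs.length := by omega
        rw [List.getElem_take, List.getElem_drop] at hg
        have := hdig (l + i) (by omega) (by omega)
        rwa [List.getD_eq_getElem cs ' ' hil, hg] at this
      have hd9 : isDigB (cs.getD (j - 1) ' ') = true := hdig (j - 1) (by omega) (by omega)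
      rw [hds, increment_run _ _ _ hpre hd9 hne9, if_neg hjl]
      simp

-- ===== VERDICT (by name: the statement is the Claim_ definition above) =====
theorem f_spec : Claim_equal_f := by
  intro S _
  unfold Spec_f
  exact f_eq_f_alt S
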